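-- pv_equiv track=rewrite | github.com/jliu531/misc-exercises | sandwiches.py | FoodDistribution
-- ===== SOURCE A (Python) =====
-- import itertools
--
-- def FoodDistribution(arr):
--
--   def difference(arr):
--     '''returns the sum of the differences between each element of the given list'''
--     total = 0
--     for i in range(len(arr)-1):
--       total += abs(arr[i+1]-arr[i])
--     return total
--
--   def get_required_sandwiches(arr):
--     '''returns the amount of sandwiches needed so that the difference between each pair
--     of people is 0'''
--     base = min(arr)
--     sandwiches = 0
--     for i in arr:
--       sandwiches += abs(i-base)
--     return sandwiches
--
--   def get_combinations(n, m):
--     '''generate the ways n sandwiches can be distributed to m people'''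
--     for choice in itertools.combinations(range(n+m-1), n):
--         slot = [c-i for i,c in enumerate(choice)]
--         result = [0]*m
--         for i in slot:
--             result[i] += 1
--         yield result
--
--   def list_subtraction(list1, list2):
--     '''performs element wise subtraction with the two lists given, returns false if the resulting
--     list contains a negative number'''
--     difference = []
--     for i in range(len(list1)):
--       if list1[i] - list2[i] >= 0:
--         difference.append(list1[i] - list2[i])
--       else:
--         return False
--     return difference
--
--   #################################### end helpers ############################################################
--
--   sandwiches = arr[0]
--   people = arr[1:]
--   if sandwiches >= get_required_sandwiches(people):
--     return 0
--   else:
--     n_people = len(people)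
--     diff = None
--     for i in range(sandwiches+1):
--       sandwich_dist = list(get_combinations(i, n_people))
--       for combo in sandwich_dist:
--         if list_subtraction(people, combo) != False:
--           temp = difference(list_subtraction(people, combo))
--           if diff == None or temp < diff:
--             diff = temp
--   return diff
-- ===== SOURCE B (Python) =====
-- def FoodDistribution(arr):
--   sandwiches = arr[0]
--   people = arr[1:]
--   base = min(people)
--   need = 0
--   for p in people:
--     need += p - base
--   if sandwiches >= need:
--     return 0
--
--   def best(rest, prev, budget):
--     '''min total adjacent difference for the remaining people, given the previous
--     person's final value and the sandwiches still available'''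
--     if not rest:
--       return 0
--     p = rest[0]
--     return min(abs(v - prev) + best(rest[1:], v, budget - (p - v))
--                for v in range(max(0, p - budget), p + 1))
--
--   first = people[0]
--   return min(best(people[1:], v, sandwiches - (first - v))
--              for v in range(max(0, first - sandwiches), first + 1))
-- ===== Notes on version B (the rewrite author's own statement) =====
-- stated objective: alternative
-- what changed: A enumerates, for every total i up to the sandwich count, all stars-and-bars distributions via itertools.combinations index tuples, decodes each into a vector and filters by elementwise subtraction; B searches directly over each person's final value with a running budget, so infeasible branches are never generated and the adjacent-difference cost is accumulated incrementally.
-- outside the precondition, e.g. on FoodDistribution([2, 3, -1]): A returns None, B raises ValueError; on FoodDistribution([5]): A raises ValueError, B raises ValueError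
import Mathlib
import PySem

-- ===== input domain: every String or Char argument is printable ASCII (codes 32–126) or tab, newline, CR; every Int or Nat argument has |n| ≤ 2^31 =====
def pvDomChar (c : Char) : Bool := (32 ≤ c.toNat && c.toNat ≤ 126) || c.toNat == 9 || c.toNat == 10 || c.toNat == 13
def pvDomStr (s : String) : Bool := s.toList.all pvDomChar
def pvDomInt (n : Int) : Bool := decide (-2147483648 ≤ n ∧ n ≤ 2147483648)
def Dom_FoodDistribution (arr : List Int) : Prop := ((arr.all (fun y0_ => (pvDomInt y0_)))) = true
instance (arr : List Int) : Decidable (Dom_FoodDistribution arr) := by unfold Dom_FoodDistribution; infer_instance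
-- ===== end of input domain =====

-- B replaces A's per-total stars-and-bars enumeration (itertools.combinations index tuples decoded
-- into distribution vectors, filtered by elementwise subtraction) by a direct recursive search over
-- the final values of each person within the remaining budget; objective: alternative.

-- ===== PORT A =====
def pvDifference (arr : List Int) : Int :=
  (PySem.List.pyRange 0 ((arr.length : Int) - 1) 1).foldl
    (fun total i => total + |PySem.List.pyGetD arr (i + 1) 0 - PySem.List.pyGetD arr i 0|) 0

def pvRequired (people : List Int) : Int :=
  match PySem.List.min? people (fun x => x) with
  | none => 0          -- unreachable under Pre_ (min([]) raises ValueError)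
  | some base => people.foldl (fun s i => s + |i - base|) 0

def pvBump (res : List Int) (i : Int) : List Int :=
  PySem.List.pySetD res i (PySem.List.pyGetD res i 0 + 1)   -- result[i] += 1 (i provably in range here)

def pvGetCombinations (n m : Nat) : List (List Int) :=
  (PySem.List.combinations (PySem.List.pyRange 0 ((n : Int) + (m : Int) - 1) 1) n).map
    (fun choice =>
      let slot := (PySem.List.enumerate choice 0).map (fun ic => ic.2 - ic.1)
      slot.foldl pvBump (List.replicate m 0))

def pvListSubGo (l1 l2 : List Int) (i : Nat) (acc : List Int) : Option (List Int) :=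
  if _h : i < l1.length then
    if 0 ≤ PySem.List.pyGetD l1 (i : Int) 0 - PySem.List.pyGetD l2 (i : Int) 0 then
      pvListSubGo l1 l2 (i + 1) (acc ++ [PySem.List.pyGetD l1 (i : Int) 0 - PySem.List.pyGetD l2 (i : Int) 0])
    else none           -- Python returns False
  else some acc
termination_by l1.length - i

def pvListSub (l1 l2 : List Int) : Option (List Int) := pvListSubGo l1 l2 0 []

def FoodDistribution (arr : List Int) : Int :=
  let sandwiches := PySem.List.pyGetD arr 0 0        -- arr[0] (IndexError on [] is outside Pre_)
  let people := PySem.List.slice arr (some 1) none   -- arr[1:]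
  if pvRequired people ≤ sandwiches then 0
  else
    let nPeople := people.length
    let diff : Option Int :=
      (PySem.List.pyRange 0 (sandwiches + 1) 1).foldl
        (fun diff i =>
          (pvGetCombinations i.toNat nPeople).foldl
            (fun diff combo =>
              match pvListSub people combo with
              | none => diff
              | some sub =>
                let temp := pvDifference sub
                match diff with
                | none => some temp
                | some d => if temp < d then some temp else some d)
            diff)
        none
    diff.getD 0     -- Python returns None (not an int) only outside Pre_

-- ===== PORT B =====
def pvBest (rest : List Int) (prev budget : Int) : Int :=
  match rest with
  | [] => 0
  | p :: tail =>
    (PySem.List.min?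
      ((PySem.List.pyRange (max 0 (p - budget)) (p + 1) 1).map
        (fun v => |v - prev| + pvBest tail v (budget - (p - v))))
      (fun x => x)).getD 0        -- min() of a nonempty generator under Pre_

def FoodDistribution_alt (arr : List Int) : Int :=
  let sandwiches := PySem.List.pyGetD arr 0 0
  let people := PySem.List.slice arr (some 1) none
  let base := (PySem.List.min? people (fun x => x)).getD 0   -- min(people); [] is outside Pre_
  let need := people.foldl (fun s p => s + (p - base)) 0
  if need ≤ sandwiches then 0
  else
    match people with
    | [] => 0      -- unreachable under Pre_
    | first :: tail =>
      (PySem.List.min?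
        ((PySem.List.pyRange (max 0 (first - sandwiches)) (first + 1) 1).map
          (fun v => pvBest tail v (sandwiches - (first - v))))
        (fun x => x)).getD 0

-- ===== PRECONDITION & SPEC =====
-- Pre_ excludes: arr with fewer than two elements (A raises IndexError / ValueError), and inputs
-- where A falls into its search loop with a negative sandwich count or a negative person (there
-- no distribution is feasible, A returns None — not an int — and B's min() raises).
def Pre_FoodDistribution (arr : List Int) : Prop :=
  2 ≤ arr.length ∧
  ((0 ≤ arr.headD 0 ∧ ∀ p ∈ arr.tail, 0 ≤ p) ∨
   (arr.tail.map (fun p => p - (arr.tail.min?.getD 0))).sum ≤ arr.headD 0)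
instance (arr : List Int) : Decidable (Pre_FoodDistribution arr) := by
  unfold Pre_FoodDistribution; infer_instance

def pvWitness_FoodDistribution : List Int := [1, 3, 1]

def Spec_FoodDistribution (arr : List Int) (out : Int) : Prop := out = FoodDistribution_alt arr
instance (arr : List Int) (out : Int) : Decidable (Spec_FoodDistribution arr out) := by
  unfold Spec_FoodDistribution; infer_instance

-- ===== CLAIM (what is proved, stated in full; the proofs are below) =====
def Claim_equal_FoodDistribution : Prop := ∀ (arr : List Int), Dom_FoodDistribution arr → Pre_FoodDistribution arr → Spec_FoodDistribution arr (FoodDistribution arr)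

-- ===== LEMMAS AND PROOFS =====

-- the minimum adjacent-difference cost of a value chain, given the previous value
def pvChain (prev : Int) : List Int → Int
  | [] => 0
  | x :: xs => |x - prev| + pvChain x xs

-- b is an admissible final distribution: bounded by people pointwise, uses at most S sandwiches
def pvBounds (people b : List Int) : Prop := List.Forall₂ (fun p x => 0 ≤ x ∧ x ≤ p) people b
def pvFeas (people : List Int) (S : Int) (b : List Int) : Prop :=
  pvBounds people b ∧ people.sum - b.sum ≤ S

-- A's candidate values, flattened
def pvCands (people : List Int) (S : Int) : List Int :=
  (PySem.List.pyRange 0 (S + 1) 1).flatMap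
    (fun i => (pvGetCombinations i.toNat people.length).filterMap
      (fun combo => (pvListSub people combo).map pvDifference))

-- A's running-minimum update
def pvStep (d : Option Int) (t : Int) : Option Int :=
  match d with
  | none => some t
  | some dv => if t < dv then some t else some dv

-- equal-length elementwise subtraction with a negativity check (spec form of list_subtraction)
def pvSubAll : List Int → List Int → Option (List Int)
  | [], _ => some []
  | _ :: _, [] => none
  | a :: as, b :: bs => if 0 ≤ a - b then (pvSubAll as bs).map ((a - b) :: ·) else none


theorem pv_foldl_match {α β γ : Type} (l : List α) (h : α → Option β) (F : γ → β → γ)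
    (init : γ) :
    l.foldl (fun d c => match h c with | none => d | some b => F d b) init
      = (l.filterMap h).foldl F init := by
  induction l generalizing init with
  | nil => rfl
  | cons x xs ih =>
    simp only [List.foldl_cons, List.filterMap_cons]
    cases hx : h x <;> simp [ih]

theorem pv_foldl_pvStep_some (L : List Int) (a : Int) :
    ∃ r, L.foldl pvStep (some a) = some r ∧ r ≤ a ∧ (r = a ∨ r ∈ L) ∧ ∀ t ∈ L, r ≤ t := by
  induction L generalizing a with
  | nil => exact ⟨a, rfl, le_refl a, Or.inl rfl, by simp⟩
  | cons x xs ih =>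
    simp only [List.foldl_cons]
    by_cases hx : x < a
    · obtain ⟨r, h1, h2, h3, h4⟩ := ih x
      refine ⟨r, by simpa [pvStep, hx] using h1, by omega, ?_, ?_⟩
      · rcases h3 with h | h
        · exact Or.inr (by simp [h])
        · exact Or.inr (by simp [h])
      · intro t ht
        rcases List.mem_cons.mp ht with h | h
        · omega
        · exact h4 t h
    · obtain ⟨r, h1, h2, h3, h4⟩ := ih a
      refine ⟨r, by simpa [pvStep, hx] using h1, h2, ?_, ?_⟩
      · rcases h3 with h | h
        · exact Or.inl h
        · exact Or.inr (by simp [h])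
      · intro t ht
        rcases List.mem_cons.mp ht with h | h
        · omega
        · exact h4 t h

theorem pv_foldl_pvStep_ne_nil (L : List Int) (h : L ≠ []) :
    ∃ r, L.foldl pvStep none = some r ∧ r ∈ L ∧ ∀ t ∈ L, r ≤ t := by
  match L with
  | x :: xs =>
    obtain ⟨r, h1, h2, h3, h4⟩ := pv_foldl_pvStep_some xs x
    refine ⟨r, by simpa [pvStep] using h1, ?_, ?_⟩
    · rcases h3 with h | h
      · simp [h]
      · exact List.mem_cons_of_mem _ h
    · intro t ht
      rcases List.mem_cons.mp ht with h | h
      · omega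
      · exact h4 t h

-- ---- list_subtraction characterization ----

theorem pvSubAll_eq_some {l1 l2 : List Int} (h : List.Forall₂ (fun a b => 0 ≤ a - b) l1 l2) :
    pvSubAll l1 l2 = some (List.zipWith (· - ·) l1 l2) := by
  induction h with
  | nil => rfl
  | cons ha _ ih =>
    simp [pvSubAll, ih]
    omega

theorem pvSubAll_some_inv : ∀ {l1 l2 sub : List Int}, pvSubAll l1 l2 = some sub →
    l2.length = l1.length →
    List.Forall₂ (fun a b => 0 ≤ a - b) l1 l2 ∧ sub = List.zipWith (· - ·) l1 l2 := by
  intro l1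
  induction l1 with
  | nil =>
    intro l2 sub h hlen
    have : l2 = [] := List.eq_nil_of_length_eq_zero (by simpa using hlen)
    subst this
    simp only [pvSubAll, Option.some.injEq] at h
    subst h
    exact ⟨List.Forall₂.nil, rfl⟩
  | cons a as ih =>
    intro l2 sub h hlen
    match l2 with
    | [] => simp at hlen
    | b :: bs =>
      by_cases hab : 0 ≤ a - b
      · simp only [pvSubAll, if_pos hab, Option.map_eq_some_iff] at h
        obtain ⟨w, hw, hsub⟩ := h
        obtain ⟨hf, hz⟩ := ih hw (by simpa using hlen)
        exact ⟨List.Forall₂.cons hab hf, by simp [hsub.symm, hz]⟩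
      · simp only [pvSubAll] at h
        rw [if_neg hab] at h
        simp at h

theorem pvListSubGo_eq (l1 l2 : List Int) (hlen : l2.length = l1.length) :
    ∀ (k i : Nat) (acc : List Int), l1.length - i = k →
      pvListSubGo l1 l2 i acc = (pvSubAll (l1.drop i) (l2.drop i)).map (acc ++ ·) := by
  intro k
  induction k with
  | zero =>
    intro i acc hk
    have h1 : l1.length ≤ i := by omega
    rw [pvListSubGo, dif_neg (by omega)]
    rw [List.drop_eq_nil_of_le h1, List.drop_eq_nil_of_le (by omega)]
    simp [pvSubAll]
  | succ k ih =>
    intro i acc hk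
    have hi : i < l1.length := by omega
    have hi2 : i < l2.length := by omega
    rw [pvListSubGo, dif_pos hi]
    have hg1 : PySem.List.pyGetD l1 (i : Int) 0 = l1[i] := by
      rw [PySem.List.pyGetD_natCast]; exact List.getD_eq_getElem l1 0 hi
    have hg2 : PySem.List.pyGetD l2 (i : Int) 0 = l2[i] := by
      rw [PySem.List.pyGetD_natCast]; exact List.getD_eq_getElem l2 0 hi2
    rw [hg1, hg2, List.drop_eq_getElem_cons hi, List.drop_eq_getElem_cons hi2]
    by_cases hd : 0 ≤ l1[i] - l2[i]
    · rw [if_pos hd]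
      rw [ih (i + 1) (acc ++ [l1[i] - l2[i]]) (by omega)]
      simp only [pvSubAll, if_pos hd, Option.map_map]
      congr 1
      funext w
      simp
    · rw [if_neg hd]
      simp only [pvSubAll]
      rw [if_neg hd]
      rfl

theorem pvListSub_eq (l1 l2 : List Int) (hlen : l2.length = l1.length) :
    pvListSub l1 l2 = pvSubAll l1 l2 := by
  unfold pvListSub
  rw [pvListSubGo_eq l1 l2 hlen l1.length 0 [] (by omega)]
  simp

-- ---- bump (result[i] += 1) lemmas ----

theorem pvBump_length (res : List Int) (i : Int) : (pvBump res i).length = res.length := by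
  simp [pvBump, PySem.List.length_pySetD]

theorem pvBump_foldl_length (l : List Int) : ∀ res : List Int,
    (l.foldl pvBump res).length = res.length := by
  induction l with
  | nil => intro res; rfl
  | cons x xs ih =>
    intro res
    simp only [List.foldl_cons]
    rw [ih, pvBump_length]

theorem pv_sum_set : ∀ (res : List Int) (n : Nat) (v : Int) (h : n < res.length),
    (res.set n v).sum = res.sum - res[n] + v := by
  intro res
  induction res with
  | nil => simp
  | cons r rs ih =>
    intro n v h
    cases n with
    | zero => simp [List.set]; ring
    | succ k =>
      simp only [List.set, List.sum_cons, List.getElem_cons_succ]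
      rw [ih k v (by simpa using h)]
      ring

theorem pvBump_sum (res : List Int) (i : Int) (h0 : 0 ≤ i) (h1 : i < (res.length : Int)) :
    (pvBump res i).sum = res.sum + 1 := by
  have hn : i.toNat < res.length := by omega
  unfold pvBump
  rw [PySem.List.pySetD_of_nonneg (xs := res) (v := PySem.List.pyGetD res i 0 + 1) h0]
  rw [PySem.List.pyGetD_eq_getElem (xs := res) (d := 0) h0 (by omega)]
  rw [pv_sum_set res i.toNat _ hn]
  ring

theorem pvBump_foldl_sum (l : List Int) : ∀ res : List Int,
    (∀ x ∈ l, 0 ≤ x ∧ x < (res.length : Int)) →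
    (l.foldl pvBump res).sum = res.sum + l.length := by
  induction l with
  | nil => intro res _; simp
  | cons x xs ih =>
    intro res h
    have hx := h x (List.mem_cons_self ..)
    simp only [List.foldl_cons]
    rw [ih (pvBump res x) (by
      intro y hy
      have := h y (List.mem_cons_of_mem _ hy)
      rw [pvBump_length]
      exact this)]
    rw [pvBump_sum res x hx.1 hx.2]
    simp only [List.length_cons]
    push_cast
    ring

theorem pvBump_nonneg (res : List Int) (i : Int) (h0 : 0 ≤ i) (h : ∀ y ∈ res, 0 ≤ y) :
    ∀ y ∈ pvBump res i, 0 ≤ y := by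
  intro y hy
  unfold pvBump at hy
  rw [PySem.List.pySetD_of_nonneg (xs := res) (v := PySem.List.pyGetD res i 0 + 1) h0] at hy
  rcases List.mem_or_eq_of_mem_set hy with hold | hnew
  · exact h y hold
  · subst hnew
    by_cases hlt : i < (res.length : Int)
    · have hm := PySem.List.pyGetD_mem res (i := i) 0 (by constructor <;> omega)
      have := h _ hm
      omega
    · rw [PySem.List.pyGetD_of_none res i 0
        (by rw [PySem.List.pyGet?_eq_none_iff]; unfold PySem.Raise.InRange; omega)]
      omega

theorem pvBump_foldl_nonneg (l : List Int) : ∀ res : List Int, (∀ x ∈ l, 0 ≤ x) →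
    (∀ y ∈ res, 0 ≤ y) → ∀ y ∈ l.foldl pvBump res, 0 ≤ y := by
  induction l with
  | nil => intro res _ h; simpa using h
  | cons x xs ih =>
    intro res hl h
    simp only [List.foldl_cons]
    exact ih (pvBump res x)
      (fun z hz => hl z (List.mem_cons_of_mem _ hz))
      (pvBump_nonneg res x (hl x (List.mem_cons_self ..)) h)

-- ---- strictly increasing lists: positional bounds ----

theorem pv_strict_lower : ∀ (l : List Int) (lo : Int), l.Pairwise (· < ·) →
    (∀ y ∈ l, lo ≤ y) → ∀ (j : Nat) (h : j < l.length), lo + j ≤ l[j] := by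
  intro l
  induction l with
  | nil => intro lo _ _ j h; simp at h
  | cons x xs ih =>
    intro lo hp hlo j h
    have hx : lo ≤ x := hlo x (List.mem_cons_self ..)
    cases j with
    | zero => simpa using hx
    | succ k =>
      have hp' := (List.pairwise_cons.mp hp)
      have := ih (x + 1) hp'.2 (fun y hy => by have := hp'.1 y hy; omega) k (by simpa using h)
      simp only [List.getElem_cons_succ]
      push_cast
      omega

theorem pv_strict_upper : ∀ (l : List Int) (hi : Int), l.Pairwise (· < ·) →
    (∀ y ∈ l, y < hi) → ∀ (j : Nat) (h : j < l.length),
      l[j] < hi - ((l.length : Int) - 1 - (j : Int)) := by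
  intro l
  induction l with
  | nil => intro hi _ _ j h; simp at h
  | cons x xs ih =>
    intro hi hp hhi j h
    have hp' := List.pairwise_cons.mp hp
    cases j with
    | zero =>
      simp only [List.getElem_cons_zero, List.length_cons]
      match xs, hp', hhi with
      | [], _, hhi =>
        have := hhi x (List.mem_cons_self ..)
        simp only [List.length_nil]
        push_cast
        omega
      | z :: zs, hp', hhi =>
        have hlast := pv_strict_lower (z :: zs) (x + 1) hp'.2
          (fun y hy => by have := hp'.1 y hy; omega) zs.length (by simp)
        have hmem : (z :: zs)[zs.length] ∈ z :: zs := List.getElem_mem _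
        have := hhi _ (List.mem_cons_of_mem _ hmem)
        simp only [List.length_cons] at *
        push_cast at *
        omega
    | succ k =>
      have := ih hi hp'.2 (fun y hy => hhi y (List.mem_cons_of_mem _ hy)) k (by simpa using h)
      simp only [List.getElem_cons_succ, List.length_cons]
      push_cast at *
      omega

-- ---- generator, forward direction ----

theorem pvGetCombinations_mem {n m : Nat} {combo : List Int}
    (h : combo ∈ pvGetCombinations n m) :
    combo.length = m ∧ (∀ x ∈ combo, 0 ≤ x) ∧ combo.sum = (n : Int) := by
  unfold pvGetCombinations at h
  obtain ⟨choice, hc, hcombo⟩ := List.mem_map.mp h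
  obtain ⟨hsub, hlen⟩ := (PySem.List.mem_combinations_iff _ _ _).mp hc
  have hpw : choice.Pairwise (· < ·) :=
    (PySem.List.pairwise_lt_pyRange_one 0 ((n : Int) + (m : Int) - 1)).sublist hsub
  have hbnd : ∀ y ∈ choice, 0 ≤ y ∧ y < (n : Int) + (m : Int) - 1 := by
    intro y hy
    exact (PySem.List.mem_pyRange_one.mp (hsub.subset hy))
  -- every slot value is in [0, m)
  have hslot : ∀ x ∈ (PySem.List.enumerate choice 0).map (fun ic => ic.2 - ic.1),
      0 ≤ x ∧ x < (m : Int) := by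
    intro x hx
    obtain ⟨⟨j, c⟩, hjc, hxe⟩ := List.mem_map.mp hx
    obtain ⟨k, hk, hpair⟩ := (PySem.List.mem_enumerate_iff _ _ _).mp hjc
    have hjk : j = (k : Int) ∧ c = choice[k] := by
      constructor <;> · have := congrArg Prod.fst hpair; have := congrArg Prod.snd hpair; simp_all
    obtain ⟨hj, hc'⟩ := hjk
    have hlow := pv_strict_lower choice 0 hpw (fun y hy => (hbnd y hy).1) k hk
    have hup := pv_strict_upper choice ((n : Int) + (m : Int) - 1) hpw
      (fun y hy => (hbnd y hy).2) k hk
    subst hj hc' hxe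
    simp only [hlen] at hup
    constructor <;> [skip; skip] <;> dsimp only <;> omega
  have hlen2 : ((PySem.List.enumerate choice 0).map (fun ic => ic.2 - ic.1)).length = n := by
    simp [PySem.List.length_enumerate, hlen]
  subst hcombo
  refine ⟨?_, ?_, ?_⟩
  · rw [pvBump_foldl_length]; simp
  · exact pvBump_foldl_nonneg _ _ (fun x hx => (hslot x hx).1) (by simp)
  · rw [pvBump_foldl_sum _ _ (by
      intro x hx
      have := hslot x hx
      simp only [List.length_replicate]
      exact this)]
    rw [hlen2]
    simp

-- ---- generator, backward direction (surjectivity) ----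

def pvBuildSlots : List Int → Int → List Int
  | [], _ => []
  | c :: rest, k => List.replicate c.toNat k ++ pvBuildSlots rest (k + 1)

def pvAddIdx : List Int → Int → List Int
  | [], _ => []
  | x :: xs, j => (x + j) :: pvAddIdx xs (j + 1)

theorem pvBuildSlots_length (combo : List Int) : ∀ s : Int, (∀ x ∈ combo, 0 ≤ x) →
    ((pvBuildSlots combo s).length : Int) = combo.sum := by
  induction combo with
  | nil => intro s _; simp [pvBuildSlots]
  | cons c rest ih =>
    intro s h
    have hc : 0 ≤ c := h c (List.mem_cons_self ..)
    have := ih (s + 1) (fun x hx => h x (List.mem_cons_of_mem _ hx))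
    simp only [pvBuildSlots, List.length_append, List.length_replicate, List.sum_cons]
    push_cast
    omega

theorem pvBuildSlots_mem (combo : List Int) : ∀ (s : Int) (y : Int),
    y ∈ pvBuildSlots combo s → s ≤ y ∧ y < s + combo.length := by
  induction combo with
  | nil => intro s y hy; simp [pvBuildSlots] at hy
  | cons c rest ih =>
    intro s y hy
    simp only [pvBuildSlots, List.mem_append] at hy
    rcases hy with hy | hy
    · have := List.eq_of_mem_replicate hy
      subst this
      simp only [List.length_cons]
      push_cast
      omega
    · have := ih (s + 1) y hy
      simp only [List.length_cons]
      push_cast at *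
      omega

theorem pvBuildSlots_pairwise (combo : List Int) : ∀ s : Int,
    (pvBuildSlots combo s).Pairwise (· ≤ ·) := by
  induction combo with
  | nil => intro s; simp [pvBuildSlots]
  | cons c rest ih =>
    intro s
    simp only [pvBuildSlots]
    rw [List.pairwise_append]
    refine ⟨by simp [List.pairwise_replicate], ih (s + 1), ?_⟩
    intro a ha b hb
    have ha' := List.eq_of_mem_replicate ha
    have hb' := (pvBuildSlots_mem rest (s + 1) b hb).1
    omega

theorem pvAddIdx_length (l : List Int) : ∀ j : Int, (pvAddIdx l j).length = l.length := by
  induction l with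
  | nil => intro j; rfl
  | cons x xs ih => intro j; simp [pvAddIdx, ih]

theorem pvAddIdx_lower (l : List Int) : ∀ (j lo : Int), (∀ x ∈ l, lo ≤ x) →
    ∀ y ∈ pvAddIdx l j, lo + j ≤ y := by
  induction l with
  | nil => intro j lo _ y hy; simp [pvAddIdx] at hy
  | cons x xs ih =>
    intro j lo h y hy
    simp only [pvAddIdx, List.mem_cons] at hy
    rcases hy with hy | hy
    · have := h x (List.mem_cons_self ..); omega
    · have := ih (j + 1) lo (fun z hz => h z (List.mem_cons_of_mem _ hz)) y hy
      omega

theorem pvAddIdx_upper (l : List Int) : ∀ (j hi : Int), (∀ x ∈ l, x < hi) →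
    ∀ y ∈ pvAddIdx l j, y < hi + j + ((l.length : Int) - 1) := by
  induction l with
  | nil => intro j hi _ y hy; simp [pvAddIdx] at hy
  | cons x xs ih =>
    intro j hi h y hy
    simp only [pvAddIdx, List.mem_cons] at hy
    simp only [List.length_cons]
    rcases hy with hy | hy
    · have := h x (List.mem_cons_self ..); push_cast; omega
    · have := ih (j + 1) hi (fun z hz => h z (List.mem_cons_of_mem _ hz)) y hy
      push_cast at *
      omega

theorem pvAddIdx_pairwise (l : List Int) : ∀ j : Int, l.Pairwise (· ≤ ·) →
    (pvAddIdx l j).Pairwise (· < ·) := by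
  induction l with
  | nil => intro j _; simp [pvAddIdx]
  | cons x xs ih =>
    intro j hp
    have hp' := List.pairwise_cons.mp hp
    simp only [pvAddIdx]
    rw [List.pairwise_cons]
    refine ⟨?_, ih (j + 1) hp'.2⟩
    intro y hy
    have := pvAddIdx_lower xs (j + 1) x hp'.1 y hy
    omega

theorem pv_sorted_sublist_pyRange : ∀ (l : List Int) (a b : Int), l.Pairwise (· < ·) →
    (∀ y ∈ l, a ≤ y ∧ y < b) → l.Sublist (PySem.List.pyRange a b 1) := by
  intro l
  induction l with
  | nil => intro a b _ _; exact List.nil_sublist _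
  | cons x xs ih =>
    intro a b hp hb
    have hp' := List.pairwise_cons.mp hp
    have hx := hb x (List.mem_cons_self ..)
    rw [PySem.List.pyRange_one_append a x b hx.1 (by omega)]
    rw [PySem.List.pyRange_one_cons hx.2]
    have h1 : (x :: xs).Sublist (x :: PySem.List.pyRange (x + 1) b 1) :=
      List.Sublist.cons₂ x (ih (x + 1) b hp'.2 (fun y hy =>
        ⟨by have := hp'.1 y hy; omega, (hb y (List.mem_cons_of_mem _ hy)).2⟩))
    exact h1.trans (List.sublist_append_right _ _)

theorem pvAddIdx_slots (l : List Int) : ∀ j : Int,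
    (PySem.List.enumerate (pvAddIdx l j) j).map (fun ic => ic.2 - ic.1) = l := by
  induction l with
  | nil => intro j; simp [pvAddIdx]
  | cons x xs ih =>
    intro j
    simp only [pvAddIdx, PySem.List.enumerate_cons, List.map_cons, ih (j + 1)]
    congr 1
    omega

theorem pvBuildSlots_succ (combo : List Int) : ∀ s : Int,
    pvBuildSlots combo (s + 1) = (pvBuildSlots combo s).map (· + 1) := by
  induction combo with
  | nil => intro s; simp [pvBuildSlots]
  | cons c rest ih =>
    intro s
    simp only [pvBuildSlots, List.map_append, ih (s + 1), List.map_replicate]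

theorem pvBump_cons (r0 : Int) (res : List Int) (i : Int) (h : 0 ≤ i) :
    pvBump (r0 :: res) (i + 1) = r0 :: pvBump res i := by
  unfold pvBump
  rw [PySem.List.pySetD_of_nonneg (r0 :: res) _ (i := i + 1) (by omega),
      PySem.List.pySetD_of_nonneg res _ (i := i) h]
  have ht : (i + 1).toNat = i.toNat + 1 := by omega
  have hg : PySem.List.pyGetD (r0 :: res) (i + 1) 0 = PySem.List.pyGetD res i 0 := by
    by_cases hlt : i < (res.length : Int)
    · rw [PySem.List.pyGetD_eq_getElem (r0 :: res) (i := i + 1) 0 (by omega) (by simp; omega),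
          PySem.List.pyGetD_eq_getElem res (i := i) 0 h (by omega)]
      simp [ht]
    · rw [PySem.List.pyGetD_of_none _ _ _
        (by rw [PySem.List.pyGet?_eq_none_iff]; unfold PySem.Raise.InRange; simp; omega),
          PySem.List.pyGetD_of_none _ _ _
        (by rw [PySem.List.pyGet?_eq_none_iff]; unfold PySem.Raise.InRange; omega)]
  rw [hg, ht]
  rfl

theorem pvBump_foldl_cons (l : List Int) : ∀ (r0 : Int) (res : List Int), (∀ x ∈ l, 0 ≤ x) →
    (l.map (· + 1)).foldl pvBump (r0 :: res) = r0 :: l.foldl pvBump res := by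
  induction l with
  | nil => intro r0 res _; rfl
  | cons x xs ih =>
    intro r0 res h
    simp only [List.map_cons, List.foldl_cons]
    rw [pvBump_cons r0 res x (h x (List.mem_cons_self ..))]
    exact ih r0 (pvBump res x) (fun z hz => h z (List.mem_cons_of_mem _ hz))

theorem pvBump_foldl_zeros (t : Nat) : ∀ (r : Int) (res : List Int),
    (List.replicate t (0 : Int)).foldl pvBump (r :: res) = (r + t) :: res := by
  induction t with
  | zero => intro r res; simp
  | succ k ih =>
    intro r res
    rw [List.replicate_succ, List.foldl_cons]
    have hb : pvBump (r :: res) 0 = (r + 1) :: res := by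
      unfold pvBump
      rw [PySem.List.pySetD_of_nonneg (r :: res) _ (i := 0) (by omega)]
      rw [PySem.List.pyGetD_zero_cons]
      rfl
    rw [hb, ih (r + 1) res]
    congr 1
    push_cast
    ring

theorem pvBump_buildSlots (combo : List Int) (hnn : ∀ x ∈ combo, 0 ≤ x) :
    (pvBuildSlots combo 0).foldl pvBump (List.replicate combo.length 0) = combo := by
  induction combo with
  | nil => rfl
  | cons c rest ih =>
    have hc : 0 ≤ c := hnn c (List.mem_cons_self ..)
    have hrest : ∀ x ∈ rest, 0 ≤ x := fun x hx => hnn x (List.mem_cons_of_mem _ hx)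
    simp only [pvBuildSlots, List.length_cons, List.replicate_succ, List.foldl_append]
    rw [pvBump_foldl_zeros c.toNat 0 (List.replicate rest.length 0)]
    rw [show (0 : Int) + c.toNat = c by omega]
    rw [show (0 : Int) + 1 = 1 from rfl, show (1 : Int) = 0 + 1 from rfl, pvBuildSlots_succ]
    rw [pvBump_foldl_cons _ c _ (fun x hx => (pvBuildSlots_mem rest 0 x hx).1)]
    rw [ih hrest]

theorem pvGetCombinations_mem_of (combo : List Int) (n m : Nat)
    (hnn : ∀ x ∈ combo, 0 ≤ x) (hlen : combo.length = m) (hsum : combo.sum = (n : Int)) :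
    combo ∈ pvGetCombinations n m := by
  subst hlen
  unfold pvGetCombinations
  rw [List.mem_map]
  refine ⟨pvAddIdx (pvBuildSlots combo 0) 0, ?_, ?_⟩
  · rw [PySem.List.mem_combinations_iff]
    constructor
    · apply pv_sorted_sublist_pyRange
      · exact pvAddIdx_pairwise _ 0 (pvBuildSlots_pairwise combo 0)
      · intro y hy
        constructor
        · have := pvAddIdx_lower (pvBuildSlots combo 0) 0 0
            (fun x hx => (pvBuildSlots_mem combo 0 x hx).1) y hy
          omega
        · have hup := pvAddIdx_upper (pvBuildSlots combo 0) 0 (combo.length : Int)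
            (fun x hx => by have := (pvBuildSlots_mem combo 0 x hx).2; omega) y hy
          have hL := pvBuildSlots_length combo 0 hnn
          rw [hL] at hup
          push_cast at *
          omega
    · rw [pvAddIdx_length]
      have := pvBuildSlots_length combo 0 hnn
      omega
  · dsimp only
    rw [pvAddIdx_slots (pvBuildSlots combo 0) 0]
    exact pvBump_buildSlots combo hnn

-- ---- sums and pointwise facts ----

theorem pv_sum_le_of_bounds : ∀ {l b : List Int}, pvBounds l b → b.sum ≤ l.sum := by
  intro l b h
  induction h with
  | nil => simp
  | cons hx _ ih => simp only [List.sum_cons]; omega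

theorem pv_zipWith_sub_sum : ∀ {l b : List Int}, l.length = b.length →
    (List.zipWith (· - ·) l b).sum = l.sum - b.sum := by
  intro l
  induction l with
  | nil =>
    intro b h
    have : b = [] := List.eq_nil_of_length_eq_zero (by simp at h; omega)
    subst this; simp
  | cons x xs ih =>
    intro b h
    match b with
    | [] => simp at h
    | y :: ys =>
      simp only [List.zipWith_cons_cons, List.sum_cons, ih (by simpa using h)]
      ring

theorem pv_bounds_of_sub : ∀ {people combo : List Int},
    List.Forall₂ (fun a b => 0 ≤ a - b) people combo → (∀ x ∈ combo, 0 ≤ x) →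
    pvBounds people (List.zipWith (· - ·) people combo) := by
  intro people combo h
  induction h with
  | nil => intro _; exact List.Forall₂.nil
  | cons hx _ ih =>
    intro hnn
    exact List.Forall₂.cons
      (by
        have := hnn _ (List.mem_cons_self ..)
        dsimp only
        constructor <;> omega)
      (ih (fun z hz => hnn z (List.mem_cons_of_mem _ hz)))

theorem pv_sub_forall₂ : ∀ {people b : List Int}, pvBounds people b →
    List.Forall₂ (fun a c => 0 ≤ a - c) people (List.zipWith (· - ·) people b) := by
  intro people b h
  induction h with
  | nil => exact List.Forall₂.nil
  | cons hx _ ih => exact List.Forall₂.cons (by dsimp only; omega) ih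

theorem pv_zipWith_sub_sub : ∀ {people b : List Int}, people.length = b.length →
    List.zipWith (· - ·) people (List.zipWith (· - ·) people b) = b := by
  intro people
  induction people with
  | nil =>
    intro b h
    have : b = [] := List.eq_nil_of_length_eq_zero (by simp at h; omega)
    subst this; rfl
  | cons x xs ih =>
    intro b h
    match b with
    | [] => simp at h
    | y :: ys =>
      simp only [List.zipWith_cons_cons, ih (by simpa using h)]
      congr 1
      ring

theorem pv_zipWith_sub_nonneg : ∀ {people b : List Int}, pvBounds people b →
    ∀ x ∈ List.zipWith (· - ·) people b, 0 ≤ x := by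
  intro people b h
  induction h with
  | nil => simp
  | cons hx _ ih =>
    intro z hz
    rcases List.mem_cons.mp (by simpa using hz) with hh | hh
    · omega
    · exact ih z hh

-- ---- difference = chain cost ----

theorem pv_difference_sum (l : List Int) :
    pvDifference l = ((List.range (l.length - 1)).map
      (fun i => |l.getD (i + 1) 0 - l.getD i 0|)).sum := by
  unfold pvDifference
  rw [PySem.List.foldl_add]
  rw [PySem.List.pyRange_one 0 ((l.length : Int) - 1)]
  rw [List.map_map]
  have hlen : ((l.length : Int) - 1 - 0).toNat = l.length - 1 := by omega
  rw [hlen]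
  simp only [Function.comp_def, zero_add]
  rw [List.map_congr_left (fun (i : Nat) _ => by
    have h1 : (i : Int) + 1 = ((i + 1 : Nat) : Int) := by push_cast; ring
    rw [h1, PySem.List.pyGetD_natCast, PySem.List.pyGetD_natCast])]

theorem pvDifference_eq_chain : ∀ (x : Int) (xs : List Int),
    pvDifference (x :: xs) = pvChain x xs := by
  intro x xs
  induction xs generalizing x with
  | nil => simp [pv_difference_sum, pvChain]
  | cons y t ih =>
    rw [pv_difference_sum]
    have hlen : (x :: y :: t).length - 1 = ((y :: t).length - 1) + 1 := by simp
    rw [hlen, List.range_succ_eq_map]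
    simp only [List.map_cons, List.sum_cons, List.map_map, Function.comp_def]
    simp only [pvChain]
    rw [← ih y, pv_difference_sum (y :: t)]
    congr 1

-- ---- A's candidate values ----

theorem pv_mem_pvCands_iff (people : List Int) (S : Int) (_hS : 0 ≤ S)
    (_hp : ∀ p ∈ people, 0 ≤ p) (v : Int) :
    v ∈ pvCands people S ↔ ∃ b, pvFeas people S b ∧ v = pvDifference b := by
  unfold pvCands
  rw [List.mem_flatMap]
  constructor
  · rintro ⟨i, hi, hv⟩
    obtain ⟨hi0, hiS⟩ := PySem.List.mem_pyRange_one.mp hi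
    obtain ⟨combo, hcombo, hsub⟩ := List.mem_filterMap.mp hv
    obtain ⟨hclen, hcnn, hcsum⟩ := pvGetCombinations_mem hcombo
    obtain ⟨sub, hsome, hvd⟩ := Option.map_eq_some_iff.mp hsub
    rw [pvListSub_eq people combo hclen] at hsome
    obtain ⟨hf, hz⟩ := pvSubAll_some_inv hsome hclen
    have hzsum : sub.sum = people.sum - combo.sum := by
      rw [hz]; exact pv_zipWith_sub_sum (by omega)
    refine ⟨sub, ⟨?_, ?_⟩, hvd.symm⟩
    · rw [hz]; exact pv_bounds_of_sub hf hcnn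
    · rw [hzsum, hcsum]; omega
  · rintro ⟨b, ⟨hb, hbsum⟩, hv⟩
    have hlenb : people.length = b.length := hb.length_eq
    have hcnn : ∀ x ∈ List.zipWith (· - ·) people b, 0 ≤ x := pv_zipWith_sub_nonneg hb
    have hcs : (List.zipWith (· - ·) people b).sum = people.sum - b.sum :=
      pv_zipWith_sub_sum hlenb
    have hbs0 : b.sum ≤ people.sum := pv_sum_le_of_bounds hb
    refine ⟨people.sum - b.sum,
      PySem.List.mem_pyRange_one.mpr ⟨by omega, by omega⟩, ?_⟩
    rw [List.mem_filterMap]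
    refine ⟨List.zipWith (· - ·) people b, ?_, ?_⟩
    · apply pvGetCombinations_mem_of _ _ _ hcnn
        (by rw [List.length_zipWith]; omega)
      rw [hcs]; omega
    · rw [pvListSub_eq people _ (by rw [List.length_zipWith]; omega)]
      rw [pvSubAll_eq_some (pv_sub_forall₂ hb), pv_zipWith_sub_sub hlenb]
      simp [hv]

-- ---- B's search ----

theorem pv_min_id (l : List Int) {m : Int} (h : PySem.List.min? l (fun x => x) = some m) :
    m ∈ l ∧ ∀ y ∈ l, m ≤ y :=
  ⟨PySem.List.min?_mem h, fun y hy => PySem.List.min?_isMin h y hy⟩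

theorem pv_min_some (l : List Int) (h : l ≠ []) :
    ∃ m, PySem.List.min? l (fun x => x) = some m := by
  cases hm : PySem.List.min? l (fun x => x) with
  | none =>
    rw [PySem.List.min?_eq_none_iff] at hm
    exact absurd hm h
  | some m => exact ⟨m, rfl⟩

theorem pvBest_le : ∀ (rest : List Int) (prev budget : Int) (b : List Int),
    0 ≤ budget → pvBounds rest b → rest.sum - b.sum ≤ budget →
    pvBest rest prev budget ≤ pvChain prev b := by
  intro rest
  induction rest with
  | nil =>
    intro prev budget b _ hb _
    cases hb
    exact le_refl 0
  | cons p tail ih =>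
    intro prev budget b hbud hb hsum
    match b, hb with
    | x :: bs, hb =>
      obtain ⟨hx, htail⟩ := List.forall₂_cons.mp hb
      have htsum : bs.sum ≤ tail.sum := pv_sum_le_of_bounds htail
      simp only [List.sum_cons] at hsum
      have hxmem : x ∈ PySem.List.pyRange (max 0 (p - budget)) (p + 1) 1 :=
        PySem.List.mem_pyRange_one.mpr ⟨by omega, by omega⟩
      have hmem2 :
          |x - prev| + pvBest tail x (budget - (p - x)) ∈
            (PySem.List.pyRange (max 0 (p - budget)) (p + 1) 1).map
              (fun v => |v - prev| + pvBest tail v (budget - (p - v))) :=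
        List.mem_map_of_mem hxmem
      obtain ⟨mv, hmv⟩ := pv_min_some
        ((PySem.List.pyRange (max 0 (p - budget)) (p + 1) 1).map
          (fun v => |v - prev| + pvBest tail v (budget - (p - v))))
        (by intro hc; rw [hc] at hmem2; simp at hmem2)
      have hIH := ih x (budget - (p - x)) bs (by omega) htail (by omega)
      have hle := (pv_min_id _ hmv).2 _ hmem2
      calc pvBest (p :: tail) prev budget
          = mv := by simp only [pvBest]; rw [hmv]; rfl
        _ ≤ |x - prev| + pvBest tail x (budget - (p - x)) := hle
        _ ≤ |x - prev| + pvChain x bs := by omega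
        _ = pvChain prev (x :: bs) := rfl

theorem pvBest_ex : ∀ (rest : List Int) (prev budget : Int), (∀ p ∈ rest, 0 ≤ p) →
    0 ≤ budget →
    ∃ b, pvBounds rest b ∧ rest.sum - b.sum ≤ budget ∧ pvBest rest prev budget = pvChain prev b := by
  intro rest
  induction rest with
  | nil =>
    intro prev budget _ hbud
    exact ⟨[], List.Forall₂.nil, by simpa using hbud, rfl⟩
  | cons p tail ih =>
    intro prev budget hnn hbud
    have hp0 : 0 ≤ p := hnn p (List.mem_cons_self ..)
    have hpmem : p ∈ PySem.List.pyRange (max 0 (p - budget)) (p + 1) 1 :=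
      PySem.List.mem_pyRange_one.mpr ⟨by omega, by omega⟩
    have hmem2 :
        |p - prev| + pvBest tail p (budget - (p - p)) ∈
          (PySem.List.pyRange (max 0 (p - budget)) (p + 1) 1).map
            (fun v => |v - prev| + pvBest tail v (budget - (p - v))) :=
      List.mem_map_of_mem hpmem
    obtain ⟨mv, hmv⟩ := pv_min_some
      ((PySem.List.pyRange (max 0 (p - budget)) (p + 1) 1).map
        (fun v => |v - prev| + pvBest tail v (budget - (p - v))))
      (by intro hc; rw [hc] at hmem2; simp at hmem2)
    obtain ⟨v0, hv0mem, hv0eq⟩ := List.mem_map.mp (pv_min_id _ hmv).1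
    obtain ⟨hv00, hv01⟩ := PySem.List.mem_pyRange_one.mp hv0mem
    obtain ⟨bs, hbs1, hbs2, hbs3⟩ := ih v0 (budget - (p - v0))
      (fun z hz => hnn z (List.mem_cons_of_mem _ hz)) (by omega)
    refine ⟨v0 :: bs, List.Forall₂.cons ⟨by omega, by omega⟩ hbs1, ?_, ?_⟩
    · simp only [List.sum_cons]; omega
    · calc pvBest (p :: tail) prev budget
          = mv := by simp only [pvBest]; rw [hmv]; rfl
        _ = |v0 - prev| + pvBest tail v0 (budget - (p - v0)) := hv0eq.symm
        _ = |v0 - prev| + pvChain v0 bs := by rw [hbs3]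
        _ = pvChain prev (v0 :: bs) := rfl

-- ---- the early-equalization branch ----

theorem pvRequired_some {people : List Int} {m : Int}
    (hm : PySem.List.min? people (fun x => x) = some m) :
    pvRequired people = people.foldl (fun s i => s + |i - m|) 0 := by
  unfold pvRequired
  rw [hm]

theorem pv_need_eq (people : List Int) (h : people ≠ []) :
    people.foldl (fun s p => s + (p - (PySem.List.min? people (fun x => x)).getD 0)) 0
      = pvRequired people := by
  obtain ⟨m, hm⟩ := pv_min_some people h
  rw [pvRequired_some hm, hm]
  simp only [Option.getD_some]
  apply PySem.List.foldl_congr_mem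
  intro acc x hx
  have := (pv_min_id people hm).2 x hx
  rw [abs_of_nonneg (by omega)]

theorem pv_pre_req (people : List Int) (h : people ≠ []) :
    (people.map (fun p => p - (people.min?.getD 0))).sum = pvRequired people := by
  obtain ⟨m, hm⟩ := pv_min_some people h
  have hmm := pv_min_id people hm
  obtain ⟨m', hm'⟩ : ∃ m', people.min? = some m' := by
    cases hmin : people.min? with
    | none => exact absurd (List.min?_eq_none_iff.mp hmin) h
    | some m' => exact ⟨m', rfl⟩
  have hm'2 := List.min?_eq_some_iff.mp hm'
  have heq : m' = m := le_antisymm (hm'2.2 m hmm.1) (hmm.2 m' hm'2.1)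
  rw [pvRequired_some hm, hm']
  simp only [Option.getD_some, heq]
  rw [PySem.List.foldl_add]
  rw [List.map_congr_left (fun x hx => by
    have := hmm.2 x hx
    exact (abs_of_nonneg (by omega)).symm)]
  simp

-- A's whole search loop, as an expression over people and the sandwich count
def pvOuter (people : List Int) (S : Int) : Option Int :=
  (PySem.List.pyRange 0 (S + 1) 1).foldl
    (fun diff i =>
      (pvGetCombinations i.toNat people.length).foldl
        (fun diff combo =>
          match pvListSub people combo with
          | none => diff
          | some sub =>
            let temp := pvDifference sub
            match diff with
            | none => some temp
            | some d => if temp < d then some temp else some d)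
        diff)
    none

theorem pv_A_eval (a0 : Int) (people : List Int) :
    FoodDistribution (a0 :: people) =
      if pvRequired people ≤ a0 then 0 else (pvOuter people a0).getD 0 := by
  unfold FoodDistribution pvOuter
  simp only [PySem.List.pyGetD_zero_cons, PySem.List.slice_from_one, List.tail_cons]

theorem pv_B_eval (a0 first : Int) (tail : List Int) :
    FoodDistribution_alt (a0 :: first :: tail) =
      if (first :: tail).foldl
           (fun s p => s + (p - (PySem.List.min? (first :: tail) (fun x => x)).getD 0)) 0 ≤ a0
      then 0
      else (PySem.List.min?
        ((PySem.List.pyRange (max 0 (first - a0)) (first + 1) 1).map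
          (fun v => pvBest tail v (a0 - (first - v)))) (fun x => x)).getD 0 := by
  unfold FoodDistribution_alt
  simp only [PySem.List.pyGetD_zero_cons, PySem.List.slice_from_one, List.tail_cons]

theorem pvOuter_eq_cands (people : List Int) (S : Int) :
    pvOuter people S = (pvCands people S).foldl pvStep none := by
  unfold pvOuter pvCands
  rw [List.foldl_flatMap]
  apply PySem.List.foldl_congr_mem
  intro acc i _
  rw [← pv_foldl_match]
  apply PySem.List.foldl_congr_mem
  intro d c _
  cases hc : pvListSub people c with
  | none => cases d <;> rfl
  | some sub => cases d <;> rfl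

-- ===== VERDICT (by name: the statement is the Claim_ definition above) =====
theorem FoodDistribution_spec : Claim_equal_FoodDistribution := by
  unfold Claim_equal_FoodDistribution
  intro arr _hdom hpre
  obtain ⟨hlen, hdisj⟩ := hpre
  unfold Spec_FoodDistribution
  rcases arr with _ | ⟨a0, rest⟩
  · simp at hlen
  rcases rest with _ | ⟨p1, prest⟩
  · simp at hlen
  simp only [List.headD_cons, List.tail_cons] at hdisj
  rw [pv_A_eval, pv_B_eval]
  rw [pv_need_eq (p1 :: prest) (by simp)]
  by_cases hcase : pvRequired (p1 :: prest) ≤ a0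
  · rw [if_pos hcase, if_pos hcase]
  · rw [if_neg hcase, if_neg hcase]
    have hfirst : 0 ≤ a0 ∧ ∀ p ∈ p1 :: prest, 0 ≤ p := by
      rcases hdisj with h | h
      · exact h
      · exact absurd (by rwa [pv_pre_req _ (by simp)] at h) hcase
    obtain ⟨ha0, hppl⟩ := hfirst
    -- A's loop computes the minimum over all feasible final distributions
    have hne : pvCands (p1 :: prest) a0 ≠ [] := by
      have hmem : pvDifference (p1 :: prest) ∈ pvCands (p1 :: prest) a0 :=
        (pv_mem_pvCands_iff _ _ ha0 hppl _).mpr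
          ⟨p1 :: prest,
            ⟨List.forall₂_same.mpr (fun x hx => ⟨hppl x hx, le_refl x⟩), by simpa using ha0⟩, rfl⟩
      intro hc
      rw [hc] at hmem
      simp at hmem
    obtain ⟨r, hrfold, hrmem, hrlb⟩ := pv_foldl_pvStep_ne_nil _ hne
    obtain ⟨bA, hbAfeas, hbAr⟩ := (pv_mem_pvCands_iff _ _ ha0 hppl r).mp hrmem
    -- B's search also attains the same minimum
    have hp1 : 0 ≤ p1 := hppl p1 (List.mem_cons_self ..)
    have hprest : ∀ p ∈ prest, 0 ≤ p := fun z hz => hppl z (List.mem_cons_of_mem _ hz)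
    have hp1mem : p1 ∈ PySem.List.pyRange (max 0 (p1 - a0)) (p1 + 1) 1 :=
      PySem.List.mem_pyRange_one.mpr ⟨by omega, by omega⟩
    have hmem2 : pvBest prest p1 (a0 - (p1 - p1)) ∈
        (PySem.List.pyRange (max 0 (p1 - a0)) (p1 + 1) 1).map
          (fun v => pvBest prest v (a0 - (p1 - v))) :=
      List.mem_map_of_mem hp1mem
    obtain ⟨mv, hmv⟩ := pv_min_some
      ((PySem.List.pyRange (max 0 (p1 - a0)) (p1 + 1) 1).map
        (fun v => pvBest prest v (a0 - (p1 - v))))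
      (by intro hc; rw [hc] at hmem2; simp at hmem2)
    obtain ⟨v0, hv0mem, hv0eq⟩ := List.mem_map.mp (pv_min_id _ hmv).1
    obtain ⟨hv00, hv01⟩ := PySem.List.mem_pyRange_one.mp hv0mem
    obtain ⟨bs, hbs1, hbs2, hbs3⟩ := pvBest_ex prest v0 (a0 - (p1 - v0)) hprest (by omega)
    have hmvfeas : pvFeas (p1 :: prest) a0 (v0 :: bs) :=
      ⟨List.Forall₂.cons ⟨by omega, by omega⟩ hbs1, by simp only [List.sum_cons]; omega⟩
    have hmveq : mv = pvDifference (v0 :: bs) := by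
      rw [pvDifference_eq_chain, ← hbs3, ← hv0eq]
    have hmvlb : ∀ b, pvFeas (p1 :: prest) a0 b → mv ≤ pvDifference b := by
      rintro b ⟨hbb, hbsum⟩
      match b, hbb with
      | x :: bs', hbb =>
        obtain ⟨hx, htl⟩ := List.forall₂_cons.mp hbb
        have hsle : bs'.sum ≤ prest.sum := pv_sum_le_of_bounds htl
        simp only [List.sum_cons] at hbsum
        have hxmem : x ∈ PySem.List.pyRange (max 0 (p1 - a0)) (p1 + 1) 1 :=
          PySem.List.mem_pyRange_one.mpr ⟨by omega, by omega⟩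
        have hxval := (pv_min_id _ hmv).2 _ (List.mem_map_of_mem hxmem)
        have hble := pvBest_le prest x (a0 - (p1 - x)) bs' (by omega) htl (by omega)
        rw [pvDifference_eq_chain]
        omega
    rw [pvOuter_eq_cands, hrfold, hmv]
    simp only [Option.getD_some]
    have h1 : r ≤ mv := by
      rw [hmveq]
      exact hrlb _ ((pv_mem_pvCands_iff _ _ ha0 hppl _).mpr ⟨v0 :: bs, hmvfeas, rfl⟩)
    have h2 : mv ≤ r := by
      rw [hbAr]
      exact hmvlb bA hbAfeas
    omega
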